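-- pv_equiv track=rewrite | github.com/HikariTenshi/PyWuWaDPSCalc | import_sheets.py | find_ordered_mismatches
-- ===== SOURCE A (Python) =====
-- def find_ordered_mismatches(iterable1, iterable2):
--     """
--     Find ordered mismatches between two iterables.
--
--     :param iterable1: The first iterable to compare.
--     :type iterable1: iterable
--     :param iterable2: The second iterable to compare.
--     :type iterable2: iterable
--     :return: A tuple containing:
--             - A list of tuples where each tuple represents an index and the differing values at that index.
--             - The number of excess elements in each iterable.
--     :rtype: tuple
--     """
--     mismatches = []
--     max_length = max(len(iterable1), len(iterable2))
--
--     for i in range(max_length):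
--         val1 = iterable1[i] if i < len(iterable1) else None
--         val2 = iterable2[i] if i < len(iterable2) else None
--
--         if val1 != val2:
--             mismatches.append((i, val1, val2))
--
--     excess_in_1 = len(iterable1) - len(iterable2)
--     excess_in_2 = len(iterable2) - len(iterable1)
--
--     return mismatches, excess_in_1, excess_in_2
-- ===== SOURCE B (Python) =====
-- def find_ordered_mismatches(iterable1, iterable2):
--     """Two-pass re-implementation: zip the common prefix, then handle the tail
--     of the longer sequence separately (elements of a string sequence are never
--     None, so every leftover element is a mismatch)."""
--     n1, n2 = len(iterable1), len(iterable2)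
--     mismatches = [(i, v1, v2)
--                   for i, (v1, v2) in enumerate(zip(iterable1, iterable2))
--                   if v1 != v2]
--     if n1 > n2:
--         mismatches += [(i, iterable1[i], None) for i in range(n2, n1)]
--     elif n2 > n1:
--         mismatches += [(i, None, iterable2[i]) for i in range(n1, n2)]
--     return mismatches, n1 - n2, n2 - n1
-- ===== Notes on version B (the rewrite author's own statement) =====
-- stated objective: alternative
-- what changed: Replaces the single index loop over range(max(len1,len2)) with conditional None-padding by a zip over the common prefix plus a separate tail pass over the leftover indices of the longer sequence.
import Mathlib
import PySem

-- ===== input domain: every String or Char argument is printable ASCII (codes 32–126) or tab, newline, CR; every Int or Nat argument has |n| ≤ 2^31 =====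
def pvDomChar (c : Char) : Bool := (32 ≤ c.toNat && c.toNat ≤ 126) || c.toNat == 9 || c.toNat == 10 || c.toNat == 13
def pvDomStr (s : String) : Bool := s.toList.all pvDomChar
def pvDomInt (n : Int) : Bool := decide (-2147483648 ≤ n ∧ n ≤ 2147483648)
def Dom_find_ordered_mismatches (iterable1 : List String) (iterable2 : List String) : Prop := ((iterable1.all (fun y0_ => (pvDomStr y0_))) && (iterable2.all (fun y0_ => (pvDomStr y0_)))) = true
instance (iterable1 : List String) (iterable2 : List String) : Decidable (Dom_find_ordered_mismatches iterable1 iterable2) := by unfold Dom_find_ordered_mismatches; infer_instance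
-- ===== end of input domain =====

-- B replaces the single index loop with None-padding by a zip over the common
-- prefix plus a separate tail pass over the longer sequence (alternative
-- decomposition, same cost).

-- ===== PORT A =====
def find_ordered_mismatches (iterable1 : List String) (iterable2 : List String) :
    (List (Int × Option String × Option String)) × Int × Int :=
  let n1 : Int := iterable1.length
  let n2 : Int := iterable2.length
  let maxLength : Int := max n1 n2
  let mismatches := (PySem.List.pyRange 0 maxLength 1).foldl
    (fun acc i =>
      let val1 : Option String := if i < n1 then PySem.List.pyGet? iterable1 i else none
      let val2 : Option String := if i < n2 then PySem.List.pyGet? iterable2 i else none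
      if val1 ≠ val2 then acc ++ [(i, val1, val2)] else acc) []
  (mismatches, n1 - n2, n2 - n1)

-- ===== PORT B =====
def find_ordered_mismatches_alt (iterable1 : List String) (iterable2 : List String) :
    (List (Int × Option String × Option String)) × Int × Int :=
  let n1 : Int := iterable1.length
  let n2 : Int := iterable2.length
  let prefixMis := (PySem.List.enumerate (iterable1.zip iterable2) 0).filterMap
    (fun p => if p.2.1 ≠ p.2.2 then some (p.1, (some p.2.1 : Option String), (some p.2.2 : Option String)) else none)
  let mismatches :=
    if n1 > n2 then
      prefixMis ++ (PySem.List.pyRange n2 n1 1).map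
        (fun i => (i, PySem.List.pyGet? iterable1 i, (none : Option String)))
    else if n2 > n1 then
      prefixMis ++ (PySem.List.pyRange n1 n2 1).map
        (fun i => (i, (none : Option String), PySem.List.pyGet? iterable2 i))
    else prefixMis
  (mismatches, n1 - n2, n2 - n1)

-- ===== PRECONDITION & SPEC =====
def Spec_find_ordered_mismatches (iterable1 : List String) (iterable2 : List String)
    (out : (List (Int × Option String × Option String)) × Int × Int) : Prop :=
  out = find_ordered_mismatches_alt iterable1 iterable2
instance (iterable1 : List String) (iterable2 : List String)
    (out : (List (Int × Option String × Option String)) × Int × Int) :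
    Decidable (Spec_find_ordered_mismatches iterable1 iterable2 out) := by
  unfold Spec_find_ordered_mismatches; infer_instance

-- ===== CLAIM =====
def Claim_equal_find_ordered_mismatches : Prop :=
  ∀ (iterable1 : List String) (iterable2 : List String),
    Dom_find_ordered_mismatches iterable1 iterable2 →
    Spec_find_ordered_mismatches iterable1 iterable2 (find_ordered_mismatches iterable1 iterable2)

-- ===== LEMMAS AND PROOFS =====

/-- A's conditional element access: `xs[i] if i < len(xs) else None`. -/
def pvAv (l : List String) (j : Int) : Option String :=
  if j < (l.length : Int) then PySem.List.pyGet? l j else none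

theorem pvAv_cons_succ (a : String) (l : List String) (j : Int) (hj : 0 ≤ j) :
    pvAv (a :: l) (j + 1) = pvAv l j := by
  simp only [pvAv, List.length_cons]
  have h1 : (j + 1).toNat = j.toNat + 1 := by omega
  by_cases h : j < (l.length : Int)
  · rw [if_pos (by push_cast; omega), if_pos h,
      PySem.List.pyGet?_of_nonneg (a :: l) (by omega), PySem.List.pyGet?_of_nonneg l hj,
      h1, List.getElem?_cons_succ]
  · rw [if_neg (by push_cast; omega), if_neg h]

/-- Generalized form of B's mismatch list, started at index `k`. -/
def pvTgt (l1 l2 : List String) (k : Int) : List (Int × Option String × Option String) :=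
  (PySem.List.enumerate (l1.zip l2) k).filterMap
    (fun p => if p.2.1 ≠ p.2.2 then some (p.1, (some p.2.1 : Option String), (some p.2.2 : Option String)) else none)
  ++ (if l2.length < l1.length then
        (PySem.List.pyRange (k + (l2.length : Int)) (k + (l1.length : Int)) 1).map
          (fun i => (i, PySem.List.pyGet? l1 (i - k), (none : Option String)))
      else if l1.length < l2.length then
        (PySem.List.pyRange (k + (l1.length : Int)) (k + (l2.length : Int)) 1).map
          (fun i => (i, (none : Option String), PySem.List.pyGet? l2 (i - k)))
      else [])

theorem pvTgt_nil_nil (k : Int) : pvTgt [] [] k = [] := by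
  simp [pvTgt, PySem.List.enumerate_nil]

theorem pvGet_shift (a : String) (t : List String) (k i : Int) (h : k + 1 ≤ i) :
    PySem.List.pyGet? (a :: t) (i - k) = PySem.List.pyGet? t (i - (k + 1)) := by
  rw [PySem.List.pyGet?_of_nonneg (a :: t) (by omega), PySem.List.pyGet?_of_nonneg t (by omega)]
  have h1 : (i - k).toNat = (i - (k + 1)).toNat + 1 := by omega
  rw [h1, List.getElem?_cons_succ]

theorem pvTgt_nil_cons (b : String) (t2 : List String) (k : Int) (_hk : 0 ≤ k) :
    pvTgt [] (b :: t2) k = (k, (none : Option String), some b) :: pvTgt [] t2 (k + 1) := by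
  simp only [pvTgt, List.zip_nil_left, PySem.List.enumerate_nil, List.filterMap_nil,
    List.nil_append, List.length_nil, List.length_cons, Nat.cast_zero, add_zero]
  rw [if_neg (show ¬ (t2.length + 1 < 0) by omega), if_pos (show 0 < t2.length + 1 by omega),
    if_neg (show ¬ (t2.length < 0) by omega)]
  rw [PySem.List.pyRange_one_cons (by push_cast; omega), List.map_cons]
  congr 1
  · simp
  · by_cases h0 : t2.length = 0
    · rw [if_neg (by omega), PySem.List.pyRange_one_eq_nil (by push_cast; omega), List.map_nil]
    · rw [if_pos (by omega)]
      have he : k + ((t2.length + 1 : Nat) : Int) = (k + 1) + (t2.length : Int) := by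
        push_cast; ring
      rw [he]
      apply List.map_congr_left
      intro i hi
      rw [pvGet_shift b t2 k i (PySem.List.mem_pyRange_one.mp hi).1]

theorem pvTgt_cons_nil (a : String) (t1 : List String) (k : Int) (_hk : 0 ≤ k) :
    pvTgt (a :: t1) [] k = (k, some a, (none : Option String)) :: pvTgt t1 [] (k + 1) := by
  simp only [pvTgt, List.zip_nil_right, PySem.List.enumerate_nil, List.filterMap_nil,
    List.nil_append, List.length_nil, List.length_cons, Nat.cast_zero, add_zero]
  rw [if_pos (show 0 < t1.length + 1 by omega)]
  rw [PySem.List.pyRange_one_cons (by push_cast; omega), List.map_cons]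
  congr 1
  · simp
  · by_cases h0 : t1.length = 0
    · rw [if_neg (by omega), if_neg (by omega),
        PySem.List.pyRange_one_eq_nil (by push_cast; omega), List.map_nil]
    · rw [if_pos (by omega)]
      have he : k + ((t1.length + 1 : Nat) : Int) = (k + 1) + (t1.length : Int) := by
        push_cast; ring
      rw [he]
      apply List.map_congr_left
      intro i hi
      rw [pvGet_shift a t1 k i (PySem.List.mem_pyRange_one.mp hi).1]

theorem pvTgt_cons_cons (a b : String) (t1 t2 : List String) (k : Int) (_hk : 0 ≤ k) :
    pvTgt (a :: t1) (b :: t2) k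
      = (if a ≠ b then [((k : Int), (some a : Option String), (some b : Option String))] else [])
        ++ pvTgt t1 t2 (k + 1) := by
  have he1 : k + ((t1.length + 1 : Nat) : Int) = (k + 1) + (t1.length : Int) := by push_cast; ring
  have he2 : k + ((t2.length + 1 : Nat) : Int) = (k + 1) + (t2.length : Int) := by push_cast; ring
  simp only [pvTgt, List.zip_cons_cons, PySem.List.enumerate_cons, List.filterMap_cons,
    List.length_cons, Nat.add_lt_add_iff_right, he1, he2]
  have htail :
      (if t2.length < t1.length then
        List.map (fun i => (i, PySem.List.pyGet? (a :: t1) (i - k), (none : Option String)))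
          (PySem.List.pyRange (k + 1 + (t2.length : Int)) (k + 1 + (t1.length : Int)))
      else if t1.length < t2.length then
        List.map (fun i => ((i : Int), (none : Option String), PySem.List.pyGet? (b :: t2) (i - k)))
          (PySem.List.pyRange (k + 1 + (t1.length : Int)) (k + 1 + (t2.length : Int)))
      else []) =
      (if t2.length < t1.length then
        List.map (fun i => (i, PySem.List.pyGet? t1 (i - (k + 1)), (none : Option String)))
          (PySem.List.pyRange (k + 1 + (t2.length : Int)) (k + 1 + (t1.length : Int)))
      else if t1.length < t2.length then
        List.map (fun i => ((i : Int), (none : Option String), PySem.List.pyGet? t2 (i - (k + 1))))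
          (PySem.List.pyRange (k + 1 + (t1.length : Int)) (k + 1 + (t2.length : Int)))
      else []) := by
    split_ifs with h1 h2
    · apply List.map_congr_left; intro i hi
      have hlo := (PySem.List.mem_pyRange_one.mp hi).1
      rw [pvGet_shift a t1 k i (by omega)]
    · apply List.map_congr_left; intro i hi
      have hlo := (PySem.List.mem_pyRange_one.mp hi).1
      rw [pvGet_shift b t2 k i (by omega)]
    · rfl
  rw [htail]
  by_cases hab : a = b <;> simp [hab]

theorem pvAv_nil (j : Int) : pvAv [] j = none := by
  unfold pvAv
  split
  · simp [PySem.List.pyGet?]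
  · rfl

theorem pvAv_zero_cons (x : String) (xs : List String) : pvAv (x :: xs) 0 = some x := by
  unfold pvAv
  rw [if_pos (by exact_mod_cast Nat.succ_pos xs.length), PySem.List.pyGet?_zero_cons]

theorem pvMain (l1 : List String) : ∀ (l2 : List String) (k : Int), 0 ≤ k →
    ∀ (acc : List (Int × Option String × Option String)),
    (PySem.List.pyRange k (k + ((max l1.length l2.length : Nat) : Int)) 1).foldl
      (fun acc i =>
        if pvAv l1 (i - k) ≠ pvAv l2 (i - k) then acc ++ [(i, pvAv l1 (i - k), pvAv l2 (i - k))]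
        else acc) acc
    = acc ++ pvTgt l1 l2 k := by
  induction l1 with
  | nil =>
    intro l2
    induction l2 with
    | nil =>
      intro k hk acc
      rw [PySem.List.pyRange_one_eq_nil (by simp), List.foldl_nil, pvTgt_nil_nil,
        List.append_nil]
    | cons b t2 ih =>
      intro k hk acc
      have hM : k + ((max ([] : List String).length (b :: t2).length : Nat) : Int)
          = (k + 1) + ((max ([] : List String).length t2.length : Nat) : Int) := by
        simp; ring
      rw [hM, PySem.List.pyRange_one_cons (by omega), List.foldl_cons]
      simp only [sub_self, pvAv_nil, pvAv_zero_cons]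
      rw [if_pos (by simp)]
      rw [PySem.List.foldl_congr_mem _ _
        (fun acc i =>
          if pvAv ([] : List String) (i - (k + 1)) ≠ pvAv t2 (i - (k + 1)) then
            acc ++ [(i, pvAv ([] : List String) (i - (k + 1)), pvAv t2 (i - (k + 1)))]
          else acc) _
        (by
          intro acc2 i hi
          have hlo := (PySem.List.mem_pyRange_one.mp hi).1
          have hj : (0 : Int) ≤ i - (k + 1) := by omega
          have hs : i - k = (i - (k + 1)) + 1 := by ring
          simp only [hs, pvAv_cons_succ b t2 (i - (k + 1)) hj, pvAv_nil])]
      rw [ih (k + 1) (by omega) _, pvTgt_nil_cons b t2 k hk]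
      simp
  | cons a t1 ih =>
    intro l2
    cases l2 with
    | nil =>
      intro k hk acc
      have hM : k + ((max (a :: t1).length ([] : List String).length : Nat) : Int)
          = (k + 1) + ((max t1.length ([] : List String).length : Nat) : Int) := by
        simp; ring
      rw [hM, PySem.List.pyRange_one_cons (by omega), List.foldl_cons]
      simp only [sub_self, pvAv_nil, pvAv_zero_cons]
      rw [if_pos (by simp)]
      rw [PySem.List.foldl_congr_mem _ _
        (fun acc i =>
          if pvAv t1 (i - (k + 1)) ≠ pvAv ([] : List String) (i - (k + 1)) then
            acc ++ [(i, pvAv t1 (i - (k + 1)), pvAv ([] : List String) (i - (k + 1)))]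
          else acc) _
        (by
          intro acc2 i hi
          have hlo := (PySem.List.mem_pyRange_one.mp hi).1
          have hj : (0 : Int) ≤ i - (k + 1) := by omega
          have hs : i - k = (i - (k + 1)) + 1 := by ring
          simp only [hs, pvAv_cons_succ a t1 (i - (k + 1)) hj, pvAv_nil])]
      rw [ih [] (k + 1) (by omega) _, pvTgt_cons_nil a t1 k hk]
      simp
    | cons b t2 =>
      intro k hk acc
      have hM : k + ((max (a :: t1).length (b :: t2).length : Nat) : Int)
          = (k + 1) + ((max t1.length t2.length : Nat) : Int) := by
        simp only [List.length_cons, Nat.succ_max_succ]; push_cast; ring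
      rw [hM, PySem.List.pyRange_one_cons (by omega), List.foldl_cons]
      simp only [sub_self, pvAv_zero_cons]
      rw [PySem.List.foldl_congr_mem _ _
        (fun acc i =>
          if pvAv t1 (i - (k + 1)) ≠ pvAv t2 (i - (k + 1)) then
            acc ++ [(i, pvAv t1 (i - (k + 1)), pvAv t2 (i - (k + 1)))]
          else acc) _
        (by
          intro acc2 i hi
          have hlo := (PySem.List.mem_pyRange_one.mp hi).1
          have hj : (0 : Int) ≤ i - (k + 1) := by omega
          have hs : i - k = (i - (k + 1)) + 1 := by ring
          simp only [hs, pvAv_cons_succ a t1 (i - (k + 1)) hj,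
            pvAv_cons_succ b t2 (i - (k + 1)) hj])]
      rw [ih t2 (k + 1) (by omega) _, pvTgt_cons_cons a b t1 t2 k hk]
      by_cases hab : a = b <;> simp [hab]

theorem pvTgt_zero (l1 l2 : List String) :
    pvTgt l1 l2 0
      = (PySem.List.enumerate (l1.zip l2) 0).filterMap
          (fun p => if p.2.1 ≠ p.2.2 then some (p.1, (some p.2.1 : Option String), (some p.2.2 : Option String)) else none)
        ++ (if ((l1.length : Int) > (l2.length : Int)) then
              (PySem.List.pyRange (l2.length : Int) (l1.length : Int) 1).map
                (fun i => (i, PySem.List.pyGet? l1 i, (none : Option String)))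
            else if ((l2.length : Int) > (l1.length : Int)) then
              (PySem.List.pyRange (l1.length : Int) (l2.length : Int) 1).map
                (fun i => (i, (none : Option String), PySem.List.pyGet? l2 i))
            else []) := by
  unfold pvTgt
  simp only [zero_add, sub_zero]
  congr 1
  rcases Nat.lt_trichotomy l1.length l2.length with h | h | h
  · rw [if_neg (by omega), if_pos h, if_neg (by exact_mod_cast not_lt.mpr h.le),
      if_pos (by exact_mod_cast h)]
  · rw [if_neg (by omega), if_neg (by omega), if_neg (by omega), if_neg (by omega)]
  · rw [if_pos h, if_pos (by exact_mod_cast h)]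

-- ===== VERDICT =====
theorem find_ordered_mismatches_spec : Claim_equal_find_ordered_mismatches := by
  intro l1 l2 _hdom
  unfold Spec_find_ordered_mismatches find_ordered_mismatches find_ordered_mismatches_alt
  refine congrArg₂ Prod.mk ?_ rfl
  have hbody :
      (fun (acc : List (Int × Option String × Option String)) (i : Int) =>
        let val1 : Option String :=
          if i < (l1.length : Int) then PySem.List.pyGet? l1 i else none
        let val2 : Option String :=
          if i < (l2.length : Int) then PySem.List.pyGet? l2 i else none
        if val1 ≠ val2 then acc ++ [(i, val1, val2)] else acc)
      = (fun acc i =>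
        if pvAv l1 (i - 0) ≠ pvAv l2 (i - 0) then acc ++ [(i, pvAv l1 (i - 0), pvAv l2 (i - 0))]
        else acc) := by
    funext acc i
    simp [pvAv]
  have hrange : max (l1.length : Int) (l2.length : Int)
      = (0 : Int) + ((max l1.length l2.length : Nat) : Int) := by
    simp [Nat.cast_max]
  rw [hbody, hrange, pvMain l1 l2 0 le_rfl [], List.nil_append, pvTgt_zero]
  split_ifs <;> simp
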